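-- pv_equiv track=rewrite | github.com/bonifacyi/poker | poker.py | two_pair
-- ===== SOURCE A (Python) =====
-- def two_pair(ranks):
--     """Если есть две пары, то возврщает два соответствующих ранга,
--     иначе возвращает None"""
--     ranks_dup = ranks.copy()
--     pair = []
--     for rank in ranks:
--         if ranks_dup.count(rank) == 2:
--             ranks_dup.remove(rank)
--             pair.append(rank)
--     if len(pair) == 2:
--         return sorted(pair, reverse=True)
-- ===== SOURCE B (Python) =====
-- def two_pair(ranks):
--     """Если есть две пары, то возврщает два соответствующих ранга,
--     иначе возвращает None"""
--     counts = {}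
--     for rank in ranks:
--         counts[rank] = counts.get(rank, 0) + 1
--     pair = [rank for rank in counts if counts[rank] == 2]
--     if len(pair) == 2:
--         return sorted(pair, reverse=True)
-- ===== Notes on version B (the rewrite author's own statement) =====
-- stated objective: simpler
-- what changed: Replaces A's mutating copy/.count/.remove scan (repeated O(n) counts against a shrinking duplicate list) with one counting-dict pass followed by a single filter over the distinct ranks.
import Mathlib
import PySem

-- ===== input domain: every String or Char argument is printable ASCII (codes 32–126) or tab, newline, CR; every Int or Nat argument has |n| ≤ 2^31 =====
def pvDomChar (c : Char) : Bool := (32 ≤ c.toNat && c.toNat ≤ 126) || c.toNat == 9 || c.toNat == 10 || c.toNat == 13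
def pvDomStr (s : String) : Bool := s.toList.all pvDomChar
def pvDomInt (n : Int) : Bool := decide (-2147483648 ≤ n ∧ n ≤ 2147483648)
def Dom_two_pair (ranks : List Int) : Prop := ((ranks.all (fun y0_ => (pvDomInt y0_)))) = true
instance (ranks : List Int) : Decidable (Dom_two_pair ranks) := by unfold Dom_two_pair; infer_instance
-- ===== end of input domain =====

-- B replaces A's copy/.count/.remove mutation loop with a single counting-dict pass (objective: simpler); return values proved equal.

-- ===== PORT A =====
-- the body of A's 'for rank in ranks' loop; state = (ranks_dup, pair)
def two_pairStep (s : List Int × List Int) (rank : Int) : List Int × List Int :=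
  if PySem.List.count s.1 rank == 2 then
    -- ranks_dup.remove(rank) cannot raise: count == 2 means rank is present
    ((PySem.List.remove? s.1 rank).getD s.1, s.2 ++ [rank])
  else s

def two_pair (ranks : List Int) : Option (List Int) :=
  let st := ranks.foldl two_pairStep (ranks, [])
  if st.2.length == 2 then some (PySem.List.sorted st.2 (fun x => x) true) else none

-- ===== PORT B =====
def two_pair_alt (ranks : List Int) : Option (List Int) :=
  let counts := ranks.foldl
    (fun (d : PySem.Dict Int Int) rank => d.insert rank (d.getD rank 0 + 1)) PySem.Dict.empty
  -- counts[rank] in the comprehension cannot raise: rank ranges over counts' keys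
  let pair := counts.keys.filter (fun rank => counts.getD rank 0 == 2)
  if pair.length == 2 then some (PySem.List.sorted pair (fun x => x) true) else none

-- ===== PRECONDITION & SPEC =====
def Spec_two_pair (ranks : List Int) (out : Option (List Int)) : Prop := out = two_pair_alt ranks
instance (ranks : List Int) (out : Option (List Int)) : Decidable (Spec_two_pair ranks out) := by unfold Spec_two_pair; infer_instance

-- ===== CLAIM (what is proved, stated in full; the proofs are below) =====
def Claim_equal_two_pair : Prop := ∀ (ranks : List Int), Dom_two_pair ranks → Spec_two_pair ranks (two_pair ranks)

-- ===== LEMMAS AND PROOFS =====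

-- A's loop: the pair list collects, without duplicates, exactly the ranks whose
-- count in the current ranks_dup is 2, each at its first remaining occurrence.
lemma two_pair_loop_char (todo : List Int) : ∀ (dup pair : List Int),
    pair.Nodup → (∀ x ∈ pair, List.count x dup ≠ 2) →
    (todo.foldl two_pairStep (dup, pair)).2.Nodup ∧
      ∀ x, x ∈ (todo.foldl two_pairStep (dup, pair)).2 ↔
        x ∈ pair ∨ (x ∈ todo ∧ List.count x dup = 2) := by
  induction todo with
  | nil => intro dup pair hnd hcnt; simpa using hnd
  | cons r rest ih =>
    intro dup pair hnd hcnt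
    by_cases hr : List.count r dup = 2
    · have hrmem : r ∈ dup := by
        have : 0 < List.count r dup := by omega
        exact List.count_pos_iff.mp this
      have hstep : two_pairStep (dup, pair) r = (dup.erase r, pair ++ [r]) := by
        simp [two_pairStep, PySem.List.count_eq, hr,
          PySem.List.remove?_eq_some_erase dup r hrmem]
      have hrnp : r ∉ pair := fun h => hcnt r h hr
      have hnd' : (pair ++ [r]).Nodup := by
        simp [List.nodup_append, hnd]
        exact fun a ha h => hrnp (h ▸ ha)
      have hcnt' : ∀ x ∈ pair ++ [r], List.count x (dup.erase r) ≠ 2 := by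
        intro x hx
        rcases List.mem_append.mp hx with hx | hx
        · have hxr : x ≠ r := fun h => hrnp (h ▸ hx)
          rw [List.count_erase_of_ne hxr]
          exact hcnt x hx
        · simp at hx
          subst hx
          rw [List.count_erase_self, hr]
          omega
      obtain ⟨h1, h2⟩ := ih (dup.erase r) (pair ++ [r]) hnd' hcnt'
      rw [List.foldl_cons, hstep]
      refine ⟨h1, fun x => (h2 x).trans ?_⟩
      by_cases hxr : x = r
      · subst hxr; simp [hr]
      · rw [List.count_erase_of_ne hxr]
        simp [hxr]
    · have hstep : two_pairStep (dup, pair) r = (dup, pair) := by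
        simp [two_pairStep, PySem.List.count_eq, hr]
      obtain ⟨h1, h2⟩ := ih dup pair hnd hcnt
      rw [List.foldl_cons, hstep]
      refine ⟨h1, fun x => (h2 x).trans ?_⟩
      by_cases hxr : x = r
      · subst hxr; simp [hr]
      · simp [hxr]

-- B's counting dict: looking up any rank yields its count in the processed list.
lemma counts_getD (l : List Int) : ∀ (d : PySem.Dict Int Int) (r : Int),
    (l.foldl (fun d rank => d.insert rank (d.getD rank 0 + 1)) d).getD r 0
      = d.getD r 0 + (List.count r l : Int) := by
  induction l with
  | nil => intro d r; simp
  | cons a rest ih =>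
    intro d r
    rw [List.foldl_cons, ih]
    by_cases h : r = a
    · subst h
      rw [PySem.Dict.getD_insert]
      simp [List.count_cons]
      ring
    · rw [PySem.Dict.getD_insert]
      simp [h, Ne.symm h]

-- B's pair list, characterised: the distinct ranks of count 2, Nodup.
lemma two_pair_alt_pair_char (ranks : List Int) :
    ∀ pB, pB = (ranks.foldl
        (fun (d : PySem.Dict Int Int) rank => d.insert rank (d.getD rank 0 + 1))
        PySem.Dict.empty).keys.filter
          (fun rank => (ranks.foldl
            (fun (d : PySem.Dict Int Int) rank => d.insert rank (d.getD rank 0 + 1))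
            PySem.Dict.empty).getD rank 0 == 2) →
    pB.Nodup ∧ ∀ x, x ∈ pB ↔ x ∈ ranks ∧ List.count x ranks = 2 := by
  intro pB hpB
  have hkeys : (ranks.foldl
      (fun (d : PySem.Dict Int Int) rank => d.insert rank (d.getD rank 0 + 1))
      PySem.Dict.empty).keys = PySem.Set.ofList ranks := by
    rw [PySem.Dict.keys_foldl_insert (f := fun d x => d.getD x 0 + 1)]
    rfl
  have hgetD : ∀ r, (ranks.foldl
      (fun (d : PySem.Dict Int Int) rank => d.insert rank (d.getD rank 0 + 1))
      PySem.Dict.empty).getD r 0 = (List.count r ranks : Int) := by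
    intro r
    rw [counts_getD]
    simp [PySem.Dict.getD, PySem.Dict.empty, PySem.Dict.get?]
  subst hpB
  constructor
  · rw [hkeys]
    exact (PySem.Set.nodup_ofList ranks).filter _
  · intro x
    rw [hkeys, List.mem_filter, PySem.Set.mem_ofList, hgetD]
    constructor
    · rintro ⟨h1, h2⟩
      refine ⟨h1, ?_⟩
      have := of_decide_eq_true (by simpa using h2)
      exact_mod_cast this
    · rintro ⟨h1, h2⟩
      refine ⟨h1, ?_⟩
      simp [h2]

-- ===== VERDICT (by name: the statement is the Claim_ definition above) =====
theorem two_pair_spec : Claim_equal_two_pair := by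
  intro ranks _
  unfold Spec_two_pair two_pair two_pair_alt
  obtain ⟨hAnd, hAmem⟩ := two_pair_loop_char ranks ranks [] List.nodup_nil (by simp)
  obtain ⟨hBnd, hBmem⟩ := two_pair_alt_pair_char ranks _ rfl
  set pA := (ranks.foldl two_pairStep (ranks, [])).2 with hpA
  set pB := (ranks.foldl
      (fun (d : PySem.Dict Int Int) rank => d.insert rank (d.getD rank 0 + 1))
      PySem.Dict.empty).keys.filter
        (fun rank => (ranks.foldl
          (fun (d : PySem.Dict Int Int) rank => d.insert rank (d.getD rank 0 + 1))
          PySem.Dict.empty).getD rank 0 == 2) with hpB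
  have hperm : pA.Perm pB := by
    rw [List.perm_ext_iff_of_nodup hAnd hBnd]
    intro a
    rw [hBmem a, hAmem a]
    simp
  have hlen : pA.length = pB.length := hperm.length_eq
  have hsorted : PySem.List.sorted pA (fun x => x) true
      = PySem.List.sorted pB (fun x => x) true := by
    refine (PySem.List.sorted_rev_eq_of_perm_of_pairwise_gt pB
      (PySem.List.sorted pA (fun x => x) true) (fun x => x) ?_ ?_).symm
    · exact ((PySem.List.sorted_perm pA (fun x => x) true).trans hperm)
    · have h1 := PySem.List.sorted_pairwise_rev pA (fun x => x)
      have h2 : (PySem.List.sorted pA (fun x => x) true).Nodup :=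
        ((PySem.List.sorted_perm pA (fun x => x) true).nodup_iff).mpr hAnd
      have := List.Pairwise.and h1 h2
      exact this.imp (by rintro a b ⟨hle, hne⟩; exact lt_of_le_of_ne hle (Ne.symm hne))
  show (if (pA.length == 2) = true then some (PySem.List.sorted pA (fun x => x) true) else none)
      = (if (pB.length == 2) = true then some (PySem.List.sorted pB (fun x => x) true) else none)
  rw [hlen, hsorted]
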